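-- pv_equiv track=rewrite | github.com/sofyagdk/euplotes | prepare_data/3_find_frameshifts/algorithm_analysis/params_fs_predict.py | alignment_norm
-- ===== SOURCE A (Python) =====
-- def alignment_norm(alt_seq, position):
--
--     filled = -1
--     now = -1
--     while (now < position):
--         now += 1
--         if now >= len(alt_seq):
--             return filled
--         if alt_seq[now] != '-':
--             filled += 1
--     return filled
-- ===== SOURCE B (Python) =====
-- def alignment_norm(alt_seq, position):
--     n = len(alt_seq)
--     end = position + 1
--     if end > n:
--         end = n
--     if end < 0:
--         end = 0
--     gaps = 0
--     i = alt_seq.find('-')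
--     while 0 <= i < end:
--         gaps += 1
--         i = alt_seq.find('-', i + 1)
--     return end - gaps - 1
-- ===== Notes on version B (the rewrite author's own statement) =====
-- stated objective: faster
-- what changed: Instead of stepping over every character counting non-gap matches, B clamps the scan bound arithmetically and then jumps from gap to gap with str.find, counting only the '-' occurrences and returning end - gaps - 1.
import Mathlib
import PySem

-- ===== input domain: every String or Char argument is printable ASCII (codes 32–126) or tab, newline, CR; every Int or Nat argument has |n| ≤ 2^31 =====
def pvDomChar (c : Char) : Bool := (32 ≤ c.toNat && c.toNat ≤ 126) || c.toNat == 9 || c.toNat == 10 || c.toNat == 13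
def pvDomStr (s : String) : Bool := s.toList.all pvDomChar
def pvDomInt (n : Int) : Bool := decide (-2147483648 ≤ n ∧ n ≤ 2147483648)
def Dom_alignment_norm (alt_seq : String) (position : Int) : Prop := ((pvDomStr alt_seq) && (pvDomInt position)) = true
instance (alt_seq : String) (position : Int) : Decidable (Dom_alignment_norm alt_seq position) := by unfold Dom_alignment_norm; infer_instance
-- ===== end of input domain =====

-- B replaces A's character-by-character while-loop by an arithmetic clamp of the bound
-- followed by a gap-to-gap jump loop using str.find, returning end - gaps - 1 (measured faster).


-- ===== PORT A =====
-- while (now < position): now += 1; early return if now ≥ len; count non-gap.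
def alignmentNormLoop (cs : List Char) (position : Int) (filled : Int) (now : Int) : Int :=
  if h : now < position then
    let now' := now + 1
    if now' ≥ (cs.length : Int) then filled
    else
      alignmentNormLoop cs position (if cs.getD now'.toNat ' ' ≠ '-' then filled + 1 else filled) now'
  else filled
termination_by (position - now).toNat
decreasing_by omega

def alignment_norm (alt_seq : String) (position : Int) : Int :=
  alignmentNormLoop alt_seq.toList position (-1) (-1)

-- ===== PORT B =====
-- while 0 <= i < end: gaps += 1; i = alt_seq.find('-', i + 1)
-- (fuel only makes the recursion total; fuel = len + 2 never runs out, proved below)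
def bGapLoop (s : String) (e : Int) : Nat → Int → Int → Int
  | 0, gaps, _ => gaps
  | fuel + 1, gaps, i =>
      if 0 ≤ i ∧ i < e then
        bGapLoop s e fuel (gaps + 1) (PySem.Str.findFrom s "-" (i + 1) none)
      else gaps

def alignment_norm_alt (alt_seq : String) (position : Int) : Int :=
  let n : Int := (alt_seq.toList.length : Int)
  let e0 : Int := position + 1
  let e1 : Int := if e0 > n then n else e0
  let e : Int := if e1 < 0 then 0 else e1
  e - bGapLoop alt_seq e (alt_seq.toList.length + 2) 0 (PySem.Str.find alt_seq "-") - 1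

-- ===== PRECONDITION & SPEC =====
def Spec_alignment_norm (alt_seq : String) (position : Int) (out : Int) : Prop := out = alignment_norm_alt alt_seq position
instance (alt_seq : String) (position : Int) (out : Int) : Decidable (Spec_alignment_norm alt_seq position out) := by unfold Spec_alignment_norm; infer_instance

-- ===== CLAIM (what is proved, stated in full; the proofs are below) =====
def Claim_equal_alignment_norm : Prop := ∀ (alt_seq : String) (position : Int), Dom_alignment_norm alt_seq position → Spec_alignment_norm alt_seq position (alignment_norm alt_seq position)

-- ===== LEMMAS AND PROOFS =====

-- A's loop counts the non-gap characters of the scanned window.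
theorem alignmentNormLoop_eq (cs : List Char) (pos : Int) :
    ∀ (now filled : Int), -1 ≤ now →
      alignmentNormLoop cs pos filled now
        = filled + (((cs.drop (now + 1).toNat).take (pos - now).toNat).countP (fun c => c ≠ '-') : Int) := by
  intro now filled hnow
  induction hn : (pos - now).toNat using Nat.strong_induction_on generalizing now filled with
  | _ n ih =>
  subst hn
  rw [alignmentNormLoop]
  by_cases h1 : now < pos
  · rw [dif_pos h1]
    by_cases h2 : (now + 1) ≥ (cs.length : Int)
    · rw [if_pos h2]
      have hd : (cs.drop (now + 1).toNat) = [] := by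
        apply List.drop_eq_nil_of_le; omega
      simp [hd]
    · rw [if_neg h2]
      have hrec := ih (pos - (now + 1)).toNat (by omega) (now + 1)
        (if cs.getD (now + 1).toNat ' ' ≠ '-' then filled + 1 else filled) (by omega) rfl
      rw [hrec]
      have hlt : (now + 1).toNat < cs.length := by omega
      have hdrop : cs.drop (now + 1).toNat = cs[(now + 1).toNat] :: cs.drop ((now + 1).toNat + 1) :=
        List.drop_eq_getElem_cons hlt
      have hidx : ((now + 1) + 1).toNat = (now + 1).toNat + 1 := by omega
      have htake : (pos - now).toNat = (pos - (now + 1)).toNat + 1 := by omega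
      rw [hidx, hdrop, htake, List.take_succ_cons, List.countP_cons]
      have hg : cs.getD (now + 1).toNat ' ' = cs[(now + 1).toNat] := List.getD_eq_getElem _ _ hlt
      by_cases hc : cs[(now + 1).toNat] = '-'
      · simp [List.getElem?_eq_getElem hlt, hc]
      · simp only [hg, hc, ne_eq, not_false_iff, if_true, decide_true]
        push_cast
        ring
  · rw [dif_neg h1]
    have h0 : (pos - now).toNat = 0 := by omega
    rw [h0]
    simp

-- a one-character pattern is a prefix iff it is the head
theorem singleton_prefix_iff (c : Char) (l : List Char) : [c] <+: l ↔ l.head? = some c := by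
  cases l with
  | nil => simp
  | cons a t =>
    constructor
    · rintro ⟨r, hr⟩
      simp at hr
      simp [hr.1]
    · intro h
      simp at h
      exact ⟨t, by simp [h]⟩

-- no '-' before index r (as prefix-of-drop facts) means the take has gap-count 0
theorem count_take_zero (t : List Char) (r : Nat)
    (h : ∀ i, i < r → ¬ ['-'] <+: t.drop i) : (t.take r).count '-' = 0 := by
  apply List.count_eq_zero.mpr
  intro hm
  obtain ⟨i, hi, hget⟩ := List.getElem_of_mem hm
  have hil : i < r := by
    have := hi; simp [List.length_take] at this; omega
  have hit : i < t.length := by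
    have := hi; simp [List.length_take] at this; omega
  apply h i hil
  rw [singleton_prefix_iff]
  have : t.drop i = t[i] :: t.drop (i + 1) := List.drop_eq_getElem_cons hit
  rw [this]
  simp only [List.head?_cons]
  have : (t.take r)[i] = t[i] := List.getElem_take
  rw [← this, hget]

-- B's jump loop, started at the first gap at or after k, counts the gaps in cs[k:e].
theorem bGapLoop_inv (s : String) (e : Int) (he0 : 0 ≤ e) (he1 : e ≤ s.toList.length) :
    ∀ (fuel k : Nat) (gaps : Int), k ≤ s.toList.length → s.toList.length + 1 ≤ fuel + k →
      bGapLoop s e fuel gaps (PySem.Str.findFrom s "-" (k : Int) none)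
        = gaps + ((((s.toList.drop k).take (e.toNat - k)).count '-' : Nat) : Int) := by
  intro fuel
  induction fuel with
  | zero => intro k gaps hk hf; omega
  | succ fuel ih =>
    intro k gaps hk hf
    have hff := PySem.Chars.findFrom_natCast s.toList "-".toList k hk
    have hfe : PySem.Str.findFrom s "-" (k : Int) none
        = PySem.Chars.findFrom s.toList "-".toList (k : Int) none := by
      simp
    set t := s.toList.drop k with ht
    by_cases hfind : PySem.Chars.find t "-".toList = -1
    · -- no gap at or after k: loop exits, count is 0
      have hno : ¬ "-".toList <:+: t := (PySem.Chars.find_eq_neg_one_iff t _).mp hfind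
      have hcnt : (t.take (e.toNat - k)).count '-' = 0 := by
        apply count_take_zero
        intro i _ hpre
        exact hno (((by simpa using hpre : "-".toList <+: t.drop i).isInfix).trans (t.drop_suffix i).isInfix)
      rw [hfe, hff, if_pos hfind]
      simp [bGapLoop, hcnt]
    · -- first gap at absolute index k + r
      set r := PySem.Chars.find t "-".toList with hr
      have hrge : 0 ≤ r := by
        have h := PySem.Chars.neg_one_le_find t "-".toList
        rw [← hr] at h
        omega
      have hrlen : r ≤ t.length := PySem.Chars.find_le_length t _
      have hspec := PySem.Chars.find_spec (s := t) (sub := "-".toList) hrge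
      have hhead : t.drop r.toNat ≠ [] := by
        intro hnil
        have := hspec.1
        rw [hnil] at this
        simp at this
      have hgetr : t[r.toNat]? = some '-' := by
        have h1 := hspec.1
        have hlt : r.toNat < t.length := by
          by_contra hc
          exact hhead (List.drop_eq_nil_of_le (by omega))
        have h2 := (singleton_prefix_iff '-' (t.drop r.toNat)).mp (by simpa using h1)
        rw [List.drop_eq_getElem_cons hlt] at h2
        simp only [List.head?_cons] at h2
        rw [List.getElem?_eq_getElem hlt]
        exact congrArg some (Option.some.inj h2)
      have hrlt : r.toNat < t.length := by
        by_contra hc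
        exact hhead (List.drop_eq_nil_of_le (by omega))
      rw [hfe, hff, if_neg hfind]
      by_cases hlt : (k : Int) + r < e
      · -- gap inside window: count it and continue from k + r + 1
        have hguard : 0 ≤ (k : Int) + r ∧ (k : Int) + r < e := ⟨by omega, hlt⟩
        rw [bGapLoop, if_pos hguard]
        have hk' : ((k : Int) + r + 1) = (((k + r.toNat + 1 : Nat) : Int)) := by omega
        rw [hk']
        have hkk' : k + r.toNat + 1 ≤ s.toList.length := by
          have : t.length = s.toList.length - k := by simp [ht]
          omega
        rw [ih (k + r.toNat + 1) (gaps + 1) hkk' (by omega)]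
        -- arithmetic on the counts
        have hdrop' : s.toList.drop (k + r.toNat + 1) = t.drop (r.toNat + 1) := by
          simp [ht, List.drop_drop]; ring_nf
        rw [hdrop']
        have hsplit : (t.take (e.toNat - k)).count '-'
            = (t.take (r.toNat + 1)).count '-' + ((t.drop (r.toNat + 1)).take (e.toNat - (k + r.toNat + 1))).count '-' := by
          have hm : e.toNat - k = (r.toNat + 1) + (e.toNat - (k + r.toNat + 1)) := by omega
          rw [hm, List.take_add, List.count_append]
        have hone : (t.take (r.toNat + 1)).count '-' = 1 := by
          have hz : (t.take r.toNat).count '-' = 0 := count_take_zero t r.toNat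
            (by intro i hi; exact hspec.2 i (by omega))
          have : t.take (r.toNat + 1) = t.take r.toNat ++ [t[r.toNat]] := List.take_succ_eq_append_getElem hrlt
          rw [this, List.count_append, hz]
          have : t[r.toNat] = '-' := by
            have := hgetr; simp [List.getElem?_eq_getElem hrlt] at this; exact this
          simp [this]
        rw [hsplit, hone]
        push_cast
        ring
      · -- first gap at or past e: loop exits, window has no gap
        rw [bGapLoop]
        have hguard : ¬ (0 ≤ (k : Int) + r ∧ (k : Int) + r < e) := by omega
        rw [if_neg hguard]
        have hz : (t.take (e.toNat - k)).count '-' = 0 := by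
          have hle : e.toNat - k ≤ r.toNat := by omega
          have : t.take (e.toNat - k) = (t.take r.toNat).take (e.toNat - k) := by
            rw [List.take_take]; congr 1; omega
          rw [this]
          have hz0 : (t.take r.toNat).count '-' = 0 := count_take_zero t r.toNat
            (by intro i hi; exact hspec.2 i (by omega))
          have hsub : List.Sublist ((t.take r.toNat).take (e.toNat - k)) (t.take r.toNat) := List.take_sublist _ _
          have := List.Sublist.count_le '-' hsub
          omega
        simp [hz]

-- complement counting: non-gaps of a list = length - gaps
theorem countP_ne_eq (l : List Char) : l.countP (fun c => c ≠ '-') + l.count '-' = l.length := by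
  induction l with
  | nil => simp
  | cons a t ih =>
    simp only [ne_eq, decide_not] at ih ⊢
    simp only [List.countP_cons, List.count_cons, List.length_cons]
    by_cases h : a = '-' <;> simp [h] <;> omega

theorem alignment_norm_spec : Claim_equal_alignment_norm := by
  intro alt_seq position _
  unfold Spec_alignment_norm alignment_norm alignment_norm_alt
  rw [alignmentNormLoop_eq _ _ (-1) (-1) le_rfl]
  have h0 : ((-1 : Int) + 1).toNat = 0 := rfl
  rw [h0, List.drop_zero]
  set L : Nat := alt_seq.toList.length with hL
  set e : Int := (if (if position + 1 > (L : Int) then (L : Int) else position + 1) < 0 then 0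
    else (if position + 1 > (L : Int) then (L : Int) else position + 1)) with he
  have heN : e.toNat = min (position + 1).toNat L := by
    rw [he]
    by_cases hpl : position + 1 > (L : Int)
    · simp only [if_pos hpl]; split_ifs <;> omega
    · simp only [if_neg hpl]; split_ifs <;> omega
  have he0 : 0 ≤ e := by
    rw [he]
    by_cases hpl : position + 1 > (L : Int)
    · simp only [if_pos hpl]; split_ifs <;> omega
    · simp only [if_neg hpl]; split_ifs <;> omega
  have he1 : e ≤ (L : Int) := by
    rw [he]
    by_cases hpl : position + 1 > (L : Int)
    · simp only [if_pos hpl]; split_ifs <;> omega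
    · simp only [if_neg hpl]; split_ifs <;> omega
  have hfind0 : PySem.Str.find alt_seq "-" = PySem.Str.findFrom alt_seq "-" ((0 : Nat) : Int) none := by
    simp
  simp only [hfind0]
  rw [bGapLoop_inv alt_seq e he0 (by omega) (L + 2) 0 0 (by omega) (by omega)]
  rw [List.drop_zero, Nat.sub_zero]
  have htk : alt_seq.toList.take (position - -1).toNat = alt_seq.toList.take e.toNat := by
    apply List.take_eq_take_iff.mpr
    omega
  rw [htk]
  have hcnt := countP_ne_eq (alt_seq.toList.take e.toNat)
  have hlen : (alt_seq.toList.take e.toNat).length = e.toNat := by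
    rw [List.length_take]; omega
  omega
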